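-- pv_equiv track=rewrite | github.com/dmgordo/circulant-weighing-matrices | cwm_code.py | is_cwm
-- ===== SOURCE A (Python) =====
-- def is_cwm(M):
--
--     n = M[0]
--     s = M[1]
--     k = s*s
--     P = M[2]
--     N = M[3]
--
--     A = [0]*n
--
--     for s1 in P:
--         for s2 in P:
--             s = (s1-s2) % n
--             A[s] += 1
--
--     for s1 in N:
--         for s2 in N:
--             s = (s1-s2) % n
--             A[s] += 1
--
--     for s1 in P:
--         for s2 in N:
--             s = (s1-s2) % n
--             A[s] -= 1
--
--     for s1 in N:
--         for s2 in P:
--             s = (s1-s2) % n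
--             A[s] -= 1
--
--     if A[0] != k:
--         return False
--     for g in range(1,n):
--         if A[g] != 0:
--             return False
--     return True
-- ===== SOURCE B (Python) =====
-- def is_cwm(M):
--     n = M[0]
--     w = M[1]
--     P = M[2]
--     N = M[3]
--
--     # signed counter of residues: c[r] = (#occurrences of r among P mod n) - (same for N)
--     c = {}
--     for x in P:
--         r = x % n
--         c[r] = c.get(r, 0) + 1
--     for x in N:
--         r = x % n
--         c[r] = c.get(r, 0) - 1
--
--     # autocorrelation over DISTINCT residues only
--     D = {}
--     for a, ca in c.items():
--         for b, cb in c.items():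
--             d = (a - b) % n
--             D[d] = D.get(d, 0) + ca * cb
--
--     if D.get(0, 0) != w * w:
--         return False
--     return all(g == 0 or v == 0 for g, v in D.items())
-- ===== Notes on version B (the rewrite author's own statement) =====
-- stated objective: faster
-- what changed: A runs four nested quadratic passes over the raw elements of P and N, maintaining a length-n array of all lags; B builds a signed counter of the distinct residues mod n (a dict) in one linear pass and autocorrelates over distinct residues only, collecting nonzero lags in a dict keyed by lag.
import Mathlib
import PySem

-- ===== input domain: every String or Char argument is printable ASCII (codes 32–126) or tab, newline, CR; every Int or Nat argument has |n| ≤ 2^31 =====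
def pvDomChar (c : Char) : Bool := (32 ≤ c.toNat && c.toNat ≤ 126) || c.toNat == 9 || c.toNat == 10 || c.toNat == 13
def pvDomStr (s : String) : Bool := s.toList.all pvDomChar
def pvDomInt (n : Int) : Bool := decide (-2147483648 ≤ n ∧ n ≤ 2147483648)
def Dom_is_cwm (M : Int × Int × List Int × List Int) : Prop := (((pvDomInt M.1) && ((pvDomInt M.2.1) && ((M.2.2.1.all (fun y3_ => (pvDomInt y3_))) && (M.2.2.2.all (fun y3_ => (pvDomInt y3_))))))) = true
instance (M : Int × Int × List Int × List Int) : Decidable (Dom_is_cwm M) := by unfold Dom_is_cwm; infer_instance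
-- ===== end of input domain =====

-- B replaces A's four quadratic passes over raw elements and its length-n array by a signed counter of
-- distinct residues built in one pass and an autocorrelation dict over those distinct residues (alternative
-- decomposition; faster when residues repeat).

-- ===== PORT A =====

-- x % n (Python floor mod, sign of divisor)
def pvRes (n x : Int) : Int := PySem.Int.mod x n

-- 'A[s] += delta' with s = (d % n); exact for 0 ≤ s < len A, which Pre_ (1 ≤ n) guarantees
def pvBump (n : Int) (A : List Int) (d delta : Int) : List Int :=
  let s := pvRes n d
  A.set s.toNat (PySem.List.pyGetD A s 0 + delta)

def is_cwm (M : Int × Int × List Int × List Int) : Bool :=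
  let n := M.1
  let s := M.2.1
  let k := s * s
  let P := M.2.2.1
  let N := M.2.2.2
  let A0 : List Int := List.replicate n.toNat 0
  let A1 := P.foldl (fun A s1 => P.foldl (fun A s2 => pvBump n A (s1 - s2) 1) A) A0
  let A2 := N.foldl (fun A s1 => N.foldl (fun A s2 => pvBump n A (s1 - s2) 1) A) A1
  let A3 := P.foldl (fun A s1 => N.foldl (fun A s2 => pvBump n A (s1 - s2) (-1)) A) A2
  let A4 := N.foldl (fun A s1 => P.foldl (fun A s2 => pvBump n A (s1 - s2) (-1)) A) A3
  if PySem.List.pyGetD A4 0 0 ≠ k then false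
  else (PySem.List.pyRange 1 n).all (fun g => PySem.List.pyGetD A4 g 0 == 0)

-- ===== PORT B =====

def is_cwm_alt (M : Int × Int × List Int × List Int) : Bool :=
  let n := M.1
  let w := M.2.1
  let P := M.2.2.1
  let N := M.2.2.2
  let c1 := P.foldl (fun c x => c.insert (pvRes n x) (c.getD (pvRes n x) 0 + 1)) (PySem.Dict.empty : PySem.Dict Int Int)
  let c := N.foldl (fun c x => c.insert (pvRes n x) (c.getD (pvRes n x) 0 - 1)) c1
  let D := c.items.foldl (fun D p => c.items.foldl
      (fun D q => D.insert (pvRes n (p.1 - q.1)) (D.getD (pvRes n (p.1 - q.1)) 0 + p.2 * q.2)) D)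
      (PySem.Dict.empty : PySem.Dict Int Int)
  if D.getD 0 0 ≠ w * w then false
  else D.items.all (fun p => p.1 == 0 || p.2 == 0)

-- ===== PRECONDITION & SPEC =====

-- Pre_ excludes n ≤ 0, on which Python A raises (ZeroDivisionError on '% 0', or IndexError on 'A[0]'
-- since [0]*n is empty); it admits everything else.
def Pre_is_cwm (M : Int × Int × List Int × List Int) : Prop := 1 ≤ M.1
instance (M : Int × Int × List Int × List Int) : Decidable (Pre_is_cwm M) := by unfold Pre_is_cwm; infer_instance

def pvWitness_is_cwm : (Int × Int × List Int × List Int) := (7, 2, [1, 2, 4], [0])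

def Spec_is_cwm (M : Int × Int × List Int × List Int) (out : Bool) : Prop := out = is_cwm_alt M
instance (M : Int × Int × List Int × List Int) (out : Bool) : Decidable (Spec_is_cwm M out) := by unfold Spec_is_cwm; infer_instance

-- ===== CLAIM (what is proved, stated in full; the proofs are below) =====
def Claim_equal_is_cwm : Prop := ∀ (M : Int × Int × List Int × List Int), Dom_is_cwm M → Pre_is_cwm M → Spec_is_cwm M (is_cwm M)

-- ===== LEMMAS AND PROOFS =====

lemma pvBump_getD (n : Int) (hn : 0 < n) (A : List Int) (hA : A.length = n.toNat)
    (d delta g : Int) (hg0 : 0 ≤ g) (hgn : g < n) :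
    PySem.List.pyGetD (pvBump n A d delta) g 0
      = PySem.List.pyGetD A g 0 + (if pvRes n d = g then delta else 0) := by
  have hs0 : 0 ≤ pvRes n d := PySem.Int.mod_nonneg d hn
  have hsn : pvRes n d < n := PySem.Int.mod_lt d hn
  have hlen : (pvBump n A d delta).length = A.length := by simp [pvBump]
  have hglen : g < ((pvBump n A d delta).length : Int) := by omega
  have hglen' : g < (A.length : Int) := by omega
  rw [PySem.List.pyGetD_eq_getElem _ _ hg0 hglen, PySem.List.pyGetD_eq_getElem _ _ hg0 hglen']
  show (A.set (pvRes n d).toNat _)[g.toNat]'_ = _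
  rw [List.getElem_set]
  by_cases h : pvRes n d = g
  · rw [if_pos h, if_pos (show (pvRes n d).toNat = g.toNat by omega), h,
      PySem.List.pyGetD_eq_getElem _ _ hg0 hglen']
  · rw [if_neg (show ¬ (pvRes n d).toNat = g.toNat by omega), if_neg h, add_zero]

lemma pvBump_length (n : Int) (A : List Int) (d delta : Int) : (pvBump n A d delta).length = A.length := by simp [pvBump]
lemma pvFold1_length (n : Int) (x delta : Int) :
    ∀ (Y : List Int) (A : List Int),
    (Y.foldl (fun A y => pvBump n A (x - y) delta) A).length = A.length := by
  intro Y
  induction Y with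
  | nil => intro A; rfl
  | cons y t ih => intro A; rw [List.foldl_cons, ih, pvBump_length]

lemma pvFold1 (n : Int) (hn : 0 < n) (x delta g : Int) (hg0 : 0 ≤ g) (hgn : g < n) :
    ∀ (Y : List Int) (A : List Int), A.length = n.toNat →
    PySem.List.pyGetD (Y.foldl (fun A y => pvBump n A (x - y) delta) A) g 0
      = PySem.List.pyGetD A g 0 + (Y.map (fun y => if pvRes n (x - y) = g then delta else 0)).sum := by
  intro Y
  induction Y with
  | nil => intro A hA; simp
  | cons y t ih =>
      intro A hA
      rw [List.foldl_cons, ih _ (by rw [pvBump_length]; exact hA),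
        pvBump_getD n hn A hA _ _ _ hg0 hgn, List.map_cons, List.sum_cons]
      ring

lemma pvFold2_length (n : Int) (delta : Int) (Y : List Int) :
    ∀ (X : List Int) (A : List Int),
    (X.foldl (fun A x => Y.foldl (fun A y => pvBump n A (x - y) delta) A) A).length = A.length := by
  intro X
  induction X with
  | nil => intro A; rfl
  | cons x t ih => intro A; rw [List.foldl_cons, ih, pvFold1_length]

lemma pvFold2 (n : Int) (hn : 0 < n) (delta g : Int) (hg0 : 0 ≤ g) (hgn : g < n)
    (Y : List Int) :
    ∀ (X : List Int) (A : List Int), A.length = n.toNat →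
    PySem.List.pyGetD (X.foldl (fun A x => Y.foldl (fun A y => pvBump n A (x - y) delta) A) A) g 0
      = PySem.List.pyGetD A g 0
        + (X.map (fun x => (Y.map (fun y => if pvRes n (x - y) = g then delta else 0)).sum)).sum := by
  intro X
  induction X with
  | nil => intro A hA; simp
  | cons x t ih =>
      intro A hA
      rw [List.foldl_cons, ih _ (by rw [pvFold1_length]; exact hA),
        pvFold1 n hn x delta g hg0 hgn Y A hA, List.map_cons, List.sum_cons]
      ring

lemma pvDsum {α : Type} (k : α → Int) (w : α → Int) :
    ∀ (l : List α) (D : PySem.Dict Int Int) (g : Int),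
    (l.foldl (fun D a => D.insert (k a) (D.getD (k a) 0 + w a)) D).getD g 0
      = D.getD g 0 + (l.map (fun a => if k a = g then w a else 0)).sum := by
  intro l
  induction l with
  | nil => intro D g; simp
  | cons a t ih =>
      intro D g
      rw [List.foldl_cons, ih, PySem.Dict.getD_insert, List.map_cons, List.sum_cons]
      by_cases h : k a = g
      · rw [if_pos h.symm, if_pos h, h]; ring
      · rw [if_neg (fun hh => h hh.symm), if_neg h]; ring

lemma pvIndSum (F : Int → Int) : ∀ (R : List Int), R.Nodup → ∀ x ∈ R,
    (R.map (fun r => if x = r then F r else 0)).sum = F x := by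
  intro R
  induction R with
  | nil => intro _ x hx; simp at hx
  | cons r t ih =>
      intro hnd x hx
      have hnd' := List.nodup_cons.mp hnd
      rw [List.map_cons, List.sum_cons]
      rcases List.mem_cons.mp hx with h | h
      · subst h
        rw [if_pos rfl]
        have hz : (t.map (fun r' => if x = r' then F r' else 0)).sum = 0 := by
          apply List.sum_eq_zero
          intro y hy
          rcases List.mem_map.mp hy with ⟨z, hz, rfl⟩
          rw [if_neg]
          intro e
          exact hnd'.1 (e ▸ hz)
        rw [hz, add_zero]
      · rw [if_neg (by rintro rfl; exact hnd'.1 h), ih hnd'.2 x h, zero_add]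

lemma pvGroup (F : Int → Int) (R : List Int) (hR : R.Nodup) :
    ∀ (l : List Int), (∀ x ∈ l, x ∈ R) →
    (l.map F).sum = (R.map (fun r => (l.count r : Int) * F r)).sum := by
  intro l
  induction l with
  | nil => intro _; simp
  | cons x t ih =>
      intro hsub
      have hx : x ∈ R := hsub x List.mem_cons_self
      have ht : ∀ y ∈ t, y ∈ R := fun y hy => hsub y (List.mem_cons_of_mem _ hy)
      rw [List.map_cons, List.sum_cons, ih ht]
      have hstep : ∀ r : Int, ((x :: t).count r : Int) * F r
          = (t.count r : Int) * F r + (if x = r then F r else 0) := by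
        intro r
        rw [List.count_cons]
        by_cases h : x = r
        · rw [if_pos h, if_pos (beq_iff_eq.mpr h)]; push_cast; ring
        · rw [if_neg h, if_neg (by simpa using h)]; push_cast; ring
      have hmap : R.map (fun r => ((x :: t).count r : Int) * F r)
          = R.map (fun r => (t.count r : Int) * F r + (if x = r then F r else 0)) :=
        List.map_congr_left (fun r _ => hstep r)
      rw [hmap, PySem.List.sum_map_add_int, pvIndSum F R hR x hx]
      ring

def pvC (n : Int) (P N : List Int) : PySem.Dict Int Int :=
  N.foldl (fun c x => c.insert (pvRes n x) (c.getD (pvRes n x) 0 - 1))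
    (P.foldl (fun c x => c.insert (pvRes n x) (c.getD (pvRes n x) 0 + 1)) PySem.Dict.empty)

lemma pvIteSum {α : Type} (k : α → Int) (c r : Int) (l : List α) :
    (l.map (fun a => if k a = r then c else 0)).sum = c * ((l.map k).count r : Int) := by
  induction l with
  | nil => simp
  | cons a t ih =>
      rw [List.map_cons, List.sum_cons, ih, List.map_cons, List.count_cons]
      by_cases h : k a = r
      · rw [if_pos h, if_pos (beq_iff_eq.mpr h)]; push_cast; ring
      · rw [if_neg h, if_neg (by simpa using h)]; push_cast; ring

lemma pvC_getD (n : Int) (P N : List Int) (r : Int) :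
    (pvC n P N).getD r 0
      = ((P.map (pvRes n)).count r : Int) - ((N.map (pvRes n)).count r : Int) := by
  unfold pvC
  simp only [sub_eq_add_neg]
  rw [pvDsum (fun x => pvRes n x) (fun _ => (-1 : Int)),
    pvDsum (fun x => pvRes n x) (fun _ => (1 : Int)),
    pvIteSum (fun x => pvRes n x) (-1) r, pvIteSum (fun x => pvRes n x) 1 r]
  simp

lemma pvC_keys_nodup (n : Int) (P N : List Int) : (pvC n P N).keys.Nodup := by
  unfold pvC
  exact PySem.Dict.nodup_keys_foldl_insert_key _ _ _ _
    (PySem.Dict.nodup_keys_foldl_insert_key _ _ _ _ (by simp))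

lemma pvC_mem_keys (n : Int) (P N : List Int) (r : Int) :
    r ∈ (pvC n P N).keys ↔ r ∈ P.map (pvRes n) ∨ r ∈ N.map (pvRes n) := by
  unfold pvC
  rw [PySem.Dict.keys_foldl_insert_key, PySem.Dict.keys_foldl_insert_key,
    PySem.Set.mem_update, PySem.Set.mem_update]
  simp

lemma pvStar (n : Int) (P N : List Int) (F : Int → Int) :
    ((pvC n P N).items.map (fun p => p.2 * F p.1)).sum
      = ((P.map (pvRes n)).map F).sum - ((N.map (pvRes n)).map F).sum := by
  rw [PySem.Dict.items_eq_map_keys (pvC n P N) (pvC_keys_nodup n P N) 0, List.map_map]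
  have h1 : ((pvC n P N).keys.map ((fun p : Int × Int => p.2 * F p.1) ∘ fun k => (k, (pvC n P N).getD k 0))).sum
      = ((pvC n P N).keys.map (fun r => ((P.map (pvRes n)).count r : Int) * F r
          + (-(((N.map (pvRes n)).count r : Int) * F r)))).sum := by
    apply congrArg
    apply List.map_congr_left
    intro r _
    simp [pvC_getD]
    ring
  rw [h1, PySem.List.sum_map_add_int,
    ← pvGroup F _ (pvC_keys_nodup n P N) (P.map (pvRes n))
      (fun x hx => (pvC_mem_keys n P N x).mpr (Or.inl hx))]
  have h2 : ((pvC n P N).keys.map (fun r => -(((N.map (pvRes n)).count r : Int) * F r))).sum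
      = -(((pvC n P N).keys.map (fun r => ((N.map (pvRes n)).count r : Int) * F r)).sum) := by
    induction (pvC n P N).keys with
    | nil => simp
    | cons a t ih => simp [ih]; ring
  rw [h2, ← pvGroup F _ (pvC_keys_nodup n P N) (N.map (pvRes n))
      (fun x hx => (pvC_mem_keys n P N x).mpr (Or.inr hx))]
  ring

def pvS (n : Int) (X Y : List Int) (g : Int) : Int :=
  (X.map (fun x => (Y.map (fun y => if pvRes n (x - y) = g then (1 : Int) else 0)).sum)).sum

def pvCorr (n : Int) (P N : List Int) (g : Int) : Int :=
  pvS n P P g + pvS n N N g - pvS n P N g - pvS n N P g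

lemma pvSumSub {α : Type} (l : List α) (f g : α → Int) :
    (l.map (fun x => f x - g x)).sum = (l.map f).sum - (l.map g).sum := by
  induction l with
  | nil => simp
  | cons a t ih => simp [ih]; ring

def pvD (n : Int) (P N : List Int) : PySem.Dict Int Int :=
  (pvC n P N).items.foldl (fun D p => (pvC n P N).items.foldl
    (fun D q => D.insert (pvRes n (p.1 - q.1)) (D.getD (pvRes n (p.1 - q.1)) 0 + p.2 * q.2)) D)
    PySem.Dict.empty

lemma pvDsum2 {α : Type} (k : α → α → Int) (w : α → α → Int) (m : List α) :
    ∀ (l : List α) (D : PySem.Dict Int Int) (g : Int),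
    (l.foldl (fun D p => m.foldl (fun D q => D.insert (k p q) (D.getD (k p q) 0 + w p q)) D) D).getD g 0
      = D.getD g 0 + (l.map (fun p => (m.map (fun q => if k p q = g then w p q else 0)).sum)).sum := by
  intro l
  induction l with
  | nil => intro D g; simp
  | cons p t ih =>
      intro D g
      rw [List.foldl_cons, ih, pvDsum (k p) (w p), List.map_cons, List.sum_cons]
      ring

lemma pvResCollapse (n : Int) (hn : 0 < n) (x y : Int) :
    pvRes n (pvRes n x - pvRes n y) = pvRes n (x - y) := by
  simp only [pvRes, PySem.Int.mod_eq_emod_of_pos hn]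
  exact (Int.sub_emod x y n).symm

def pvH (n : Int) (P N : List Int) (g a : Int) : Int :=
  ((pvC n P N).items.map (fun q => q.2 * (if pvRes n (a - q.1) = g then 1 else 0))).sum

lemma pvH_eq (n : Int) (P N : List Int) (g a : Int) :
    pvH n P N g a = (P.map (fun y => if pvRes n (a - pvRes n y) = g then (1 : Int) else 0)).sum
      - (N.map (fun y => if pvRes n (a - pvRes n y) = g then (1 : Int) else 0)).sum := by
  unfold pvH
  rw [pvStar n P N (fun b => if pvRes n (a - b) = g then 1 else 0), List.map_map, List.map_map]
  rfl

lemma pvDcorr (n : Int) (hn : 0 < n) (P N : List Int) (g : Int) :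
    (pvD n P N).getD g 0 = pvCorr n P N g := by
  unfold pvD
  rw [pvDsum2 (fun p q : Int × Int => pvRes n (p.1 - q.1)) (fun p q => p.2 * q.2)]
  rw [PySem.Dict.getD_empty, zero_add]
  have h1 : (pvC n P N).items.map (fun p =>
        ((pvC n P N).items.map (fun q => if pvRes n (p.1 - q.1) = g then p.2 * q.2 else 0)).sum)
      = (pvC n P N).items.map (fun p => p.2 * pvH n P N g p.1) := by
    apply List.map_congr_left
    intro p _
    have : (pvC n P N).items.map (fun q => if pvRes n (p.1 - q.1) = g then p.2 * q.2 else 0)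
        = (pvC n P N).items.map (fun q => p.2 * (q.2 * (if pvRes n (p.1 - q.1) = g then 1 else 0))) := by
      apply List.map_congr_left
      intro q _
      by_cases h : pvRes n (p.1 - q.1) = g
      · rw [if_pos h, if_pos h]; ring
      · rw [if_neg h, if_neg h]; ring
    rw [this, List.sum_map_mul_left]
    rfl
  rw [h1, pvStar n P N (pvH n P N g), List.map_map, List.map_map]
  have hP : ∀ (X : List Int), X.map (pvH n P N g ∘ pvRes n)
      = X.map (fun x => (P.map (fun y => if pvRes n (x - y) = g then (1 : Int) else 0)).sum
          - (N.map (fun y => if pvRes n (x - y) = g then (1 : Int) else 0)).sum) := by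
    intro X
    apply List.map_congr_left
    intro x _
    show pvH n P N g (pvRes n x) = _
    rw [pvH_eq]
    have hc : ∀ (Y : List Int), Y.map (fun y => if pvRes n (pvRes n x - pvRes n y) = g then (1 : Int) else 0)
        = Y.map (fun y => if pvRes n (x - y) = g then (1 : Int) else 0) := by
      intro Y
      apply List.map_congr_left
      intro y _
      rw [pvResCollapse n hn x y]
    rw [hc, hc]
  rw [hP P, hP N]
  unfold pvCorr pvS
  rw [pvSumSub, pvSumSub]
  ring

lemma pvD_keys_aux (n : Int) (hn : 0 < n) (m : List (Int × Int)) :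
    ∀ (l : List (Int × Int)) (D : PySem.Dict Int Int),
    (∀ g ∈ D.keys, 0 ≤ g ∧ g < n) → D.keys.Nodup →
    (∀ g ∈ (l.foldl (fun D p => m.foldl
        (fun D q => D.insert (pvRes n (p.1 - q.1)) (D.getD (pvRes n (p.1 - q.1)) 0 + p.2 * q.2)) D) D).keys,
      0 ≤ g ∧ g < n)
    ∧ (l.foldl (fun D p => m.foldl
        (fun D q => D.insert (pvRes n (p.1 - q.1)) (D.getD (pvRes n (p.1 - q.1)) 0 + p.2 * q.2)) D) D).keys.Nodup := by
  intro l
  induction l with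
  | nil => intro D hb hnd; exact ⟨hb, hnd⟩
  | cons p t ih =>
      intro D hb hnd
      rw [List.foldl_cons]
      apply ih
      · intro g hg
        rw [PySem.Dict.keys_foldl_insert_key m (fun q => pvRes n (p.1 - q.1)) _ D] at hg
        rcases (PySem.Set.mem_update _ _ _).mp hg with h | h
        · exact hb g h
        · rcases List.mem_map.mp h with ⟨q, _, rfl⟩
          exact ⟨PySem.Int.mod_nonneg _ hn, PySem.Int.mod_lt _ hn⟩
      · exact PySem.Dict.nodup_keys_foldl_insert_key m (fun q => pvRes n (p.1 - q.1)) _ D hnd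

lemma pvD_keys (n : Int) (hn : 0 < n) (P N : List Int) :
    (∀ g ∈ (pvD n P N).keys, 0 ≤ g ∧ g < n) ∧ (pvD n P N).keys.Nodup := by
  unfold pvD
  exact pvD_keys_aux n hn (pvC n P N).items (pvC n P N).items PySem.Dict.empty
    (by simp) (by simp)

def pvArr (n : Int) (P N : List Int) : List Int :=
  N.foldl (fun A s1 => P.foldl (fun A s2 => pvBump n A (s1 - s2) (-1)) A)
    (P.foldl (fun A s1 => N.foldl (fun A s2 => pvBump n A (s1 - s2) (-1)) A)
      (N.foldl (fun A s1 => N.foldl (fun A s2 => pvBump n A (s1 - s2) 1) A)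
        (P.foldl (fun A s1 => P.foldl (fun A s2 => pvBump n A (s1 - s2) 1) A)
          (List.replicate n.toNat 0))))

lemma pvSumNeg {α : Type} (l : List α) (f : α → Int) :
    (l.map (fun x => -(f x))).sum = -((l.map f).sum) := by
  induction l with
  | nil => simp
  | cons a t ih => simp only [List.map_cons, List.sum_cons, ih]; ring

lemma pvArr_getD (n : Int) (hn : 0 < n) (P N : List Int) (g : Int) (hg0 : 0 ≤ g) (hgn : g < n) :
    PySem.List.pyGetD (pvArr n P N) g 0 = pvCorr n P N g := by
  unfold pvArr
  have l0 : (List.replicate n.toNat (0 : Int)).length = n.toNat := by simp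
  have l1 : (P.foldl (fun A s1 => P.foldl (fun A s2 => pvBump n A (s1 - s2) 1) A)
      (List.replicate n.toNat 0)).length = n.toNat := by
    rw [pvFold2_length]; exact l0
  have l2 : (N.foldl (fun A s1 => N.foldl (fun A s2 => pvBump n A (s1 - s2) 1) A)
      (P.foldl (fun A s1 => P.foldl (fun A s2 => pvBump n A (s1 - s2) 1) A)
        (List.replicate n.toNat 0))).length = n.toNat := by
    rw [pvFold2_length]; exact l1
  have l3 : (P.foldl (fun A s1 => N.foldl (fun A s2 => pvBump n A (s1 - s2) (-1)) A)
      (N.foldl (fun A s1 => N.foldl (fun A s2 => pvBump n A (s1 - s2) 1) A)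
        (P.foldl (fun A s1 => P.foldl (fun A s2 => pvBump n A (s1 - s2) 1) A)
          (List.replicate n.toNat 0)))).length = n.toNat := by
    rw [pvFold2_length]; exact l2
  rw [pvFold2 n hn (-1) g hg0 hgn P N _ l3,
    pvFold2 n hn (-1) g hg0 hgn N P _ l2,
    pvFold2 n hn 1 g hg0 hgn N N _ l1,
    pvFold2 n hn 1 g hg0 hgn P P _ l0]
  have hrep : PySem.List.pyGetD (List.replicate n.toNat (0 : Int)) g 0 = 0 := by
    rw [PySem.List.pyGetD_eq_getElem _ _ hg0 (by rw [l0]; omega)]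
    simp
  rw [hrep]
  have hneg : ∀ (X Y : List Int),
      (X.map (fun x => (Y.map (fun y => if pvRes n (x - y) = g then (-1 : Int) else 0)).sum)).sum
        = -(pvS n X Y g) := by
    intro X Y
    unfold pvS
    rw [← pvSumNeg X (fun x => (Y.map (fun y => if pvRes n (x - y) = g then (1 : Int) else 0)).sum)]
    apply congrArg
    apply List.map_congr_left
    intro x _
    rw [← pvSumNeg Y (fun y => if pvRes n (x - y) = g then (1 : Int) else 0)]
    apply congrArg
    apply List.map_congr_left
    intro y _
    by_cases h : pvRes n (x - y) = g
    · rw [if_pos h, if_pos h]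
    · rw [if_neg h, if_neg h]; ring
  rw [hneg, hneg]
  show 0 + pvS n P P g + pvS n N N g + -(pvS n P N g) + -(pvS n N P g) = _
  unfold pvCorr
  ring


theorem is_cwm_spec : Claim_equal_is_cwm := by
  intro M hDom hPre
  obtain ⟨n, s, P, N⟩ := M
  have hn : (0 : Int) < n := by exact lt_of_lt_of_le zero_lt_one hPre
  unfold Spec_is_cwm
  have hA : is_cwm (n, s, P, N)
      = (if PySem.List.pyGetD (pvArr n P N) 0 0 ≠ s * s then false
        else (PySem.List.pyRange 1 n).all (fun g => PySem.List.pyGetD (pvArr n P N) g 0 == 0)) := rfl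
  have hB : is_cwm_alt (n, s, P, N)
      = (if (pvD n P N).getD 0 0 ≠ s * s then false
        else (pvD n P N).items.all (fun p => p.1 == 0 || p.2 == 0)) := rfl
  have hall : ((PySem.List.pyRange 1 n).all (fun g => PySem.List.pyGetD (pvArr n P N) g 0 == 0))
      = (pvD n P N).items.all (fun p => p.1 == 0 || p.2 == 0) := by
    rw [Bool.eq_iff_iff]
    simp only [List.all_eq_true, beq_iff_eq, Bool.or_eq_true]
    constructor
    · intro h p hp
      have hnd := (pvD_keys n hn P N).2
      have hkey := (pvD_keys n hn P N).1 p.1 (PySem.Dict.mem_keys_of_mem_items _ hp)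
      have hval : (pvD n P N).getD p.1 0 = p.2 :=
        PySem.Dict.getD_of_mem_items _ (by exact Prod.mk.eta ▸ hp) hnd 0
      by_cases h0 : p.1 = 0
      · exact Or.inl h0
      · refine Or.inr ?_
        have hg : p.1 ∈ PySem.List.pyRange 1 n :=
          PySem.List.mem_pyRange_one.mpr ⟨by omega, hkey.2⟩
        have h2 := h p.1 hg
        rw [pvArr_getD n hn P N p.1 hkey.1 hkey.2, ← pvDcorr n hn P N p.1, hval] at h2
        exact h2
    · intro h g hg
      obtain ⟨hg1, hgn⟩ := PySem.List.mem_pyRange_one.mp hg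
      rw [pvArr_getD n hn P N g (by omega) hgn, ← pvDcorr n hn P N g]
      by_cases hc : (pvD n P N).contains g = true
      · have hmem : (g, (pvD n P N).getD g 0) ∈ (pvD n P N).items := by
          rw [PySem.Dict.items_eq_map_keys _ (pvD_keys n hn P N).2 0]
          exact List.mem_map.mpr ⟨g, (PySem.Dict.contains_iff_mem_keys _ _).mp hc, rfl⟩
        rcases h _ hmem with h0 | h0
        · exact absurd h0 (by simp; omega)
        · exact h0
      · exact PySem.Dict.getD_of_not_contains _ 0 (by simpa using hc)
  rw [hA, hB, pvArr_getD n hn P N 0 le_rfl hn, ← pvDcorr n hn P N 0, hall]
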